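-- pv_equiv track=rewrite | github.com/zhaofengqiu/temp | machine/process_capthe.py | split_bool_arr
-- ===== SOURCE A (Python) =====
-- def split_bool_arr(bool_index):
--     lis = []
--     temp = []
--     for i in range(len(bool_index)-1):
--         if bool_index[i] != bool_index[i+1]:
--             temp.append(i)
--             lis.append(temp)
--             temp = []
--         else:
--            temp.append(i)
--     return [lis[i] for i in range(len(lis)) if i% 2 ==1]
-- ===== SOURCE B (Python) =====
-- def split_bool_arr(bool_index):
--     n = len(bool_index)
--     bounds = [i for i in range(n - 1) if bool_index[i] != bool_index[i + 1]]
--     out = []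
--     start = 0
--     for k, b in enumerate(bounds):
--         if k % 2 == 1:
--             out.append(list(range(start, b + 1)))
--         start = b + 1
--     return out
-- ===== Notes on version B (the rewrite author's own statement) =====
-- stated objective: alternative
-- what changed: B precomputes the list of transition boundaries, then reconstructs each kept segment directly as a contiguous range between consecutive boundaries, emitting only the odd-indexed runs in that walk, instead of accumulating indices element by element into a temp buffer flushed at each transition and filtering afterwards.
import Mathlib
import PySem

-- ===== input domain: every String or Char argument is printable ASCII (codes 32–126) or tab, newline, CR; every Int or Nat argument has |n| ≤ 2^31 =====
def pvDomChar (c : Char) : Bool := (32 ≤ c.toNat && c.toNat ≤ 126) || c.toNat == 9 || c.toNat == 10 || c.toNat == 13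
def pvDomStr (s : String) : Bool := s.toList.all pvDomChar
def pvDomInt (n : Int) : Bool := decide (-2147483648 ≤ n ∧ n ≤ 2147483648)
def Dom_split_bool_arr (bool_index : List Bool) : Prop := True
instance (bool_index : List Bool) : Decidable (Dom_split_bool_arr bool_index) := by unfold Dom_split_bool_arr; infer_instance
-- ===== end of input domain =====

-- B replaces A's element-by-element temp-buffer accumulation with a precomputed
-- boundary table from which the odd-indexed segments are rebuilt as ranges
-- (alternative decomposition, same O(n) cost).

-- ===== PORT A =====
def split_bool_arr (bool_index : List Bool) : List (List Int) :=
  let n : Int := (bool_index.length : Int)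
  let st := (PySem.List.pyRange 0 (n - 1) 1).foldl
    (fun (st : List (List Int) × List Int) i =>
      if PySem.List.pyGet? bool_index i != PySem.List.pyGet? bool_index (i + 1) then
        (st.1 ++ [st.2 ++ [i]], [])
      else
        (st.1, st.2 ++ [i])) ([], [])
  let lis := st.1
  ((PySem.List.pyRange 0 (lis.length : Int) 1).filter
      (fun i => PySem.Int.mod i 2 == 1)).map
    (fun i => PySem.List.pyGetD lis i [])

-- ===== PORT B =====
def split_bool_arr_alt (bool_index : List Bool) : List (List Int) :=
  let n : Int := (bool_index.length : Int)
  let bounds := (PySem.List.pyRange 0 (n - 1) 1).filter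
    (fun i => PySem.List.pyGet? bool_index i != PySem.List.pyGet? bool_index (i + 1))
  let st := (PySem.List.enumerate bounds).foldl
    (fun (st : List (List Int) × Int) kb =>
      if PySem.Int.mod kb.1 2 == 1 then
        (st.1 ++ [PySem.List.pyRange st.2 (kb.2 + 1) 1], kb.2 + 1)
      else
        (st.1, kb.2 + 1)) ([], 0)
  st.1

-- ===== PRECONDITION & SPEC =====
def Spec_split_bool_arr (bool_index : List Bool) (out : List (List Int)) : Prop := out = split_bool_arr_alt bool_index
instance (bool_index : List Bool) (out : List (List Int)) : Decidable (Spec_split_bool_arr bool_index out) := by unfold Spec_split_bool_arr; infer_instance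

-- ===== CLAIM (what is proved, stated in full; the proofs are below) =====
def Claim_equal_split_bool_arr : Prop := ∀ (bool_index : List Bool), Dom_split_bool_arr bool_index → Spec_split_bool_arr bool_index (split_bool_arr bool_index)

-- ===== LEMMAS AND PROOFS =====

/-- A's loop body, abstracted over the transition test. -/
def pvSegRest (c : Int → Bool) : List Int → List Int → List (List Int) × List Int
  | temp, [] => ([], temp)
  | temp, i :: xs =>
    if c i then
      let r := pvSegRest c [] xs
      ((temp ++ [i]) :: r.1, r.2)
    else
      pvSegRest c (temp ++ [i]) xs

/-- B's segment reconstruction from boundaries (all segments, before parity selection). -/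
def pvSegB (s : Int) : List Int → List (List Int)
  | [] => []
  | b :: bs => PySem.List.pyRange s (b + 1) 1 :: pvSegB (b + 1) bs

/-- every-other-element selector: `pvPick true` keeps indices 0,2,…, `pvPick false` keeps 1,3,… -/
def pvPick {α : Type} : Bool → List α → List α
  | _, [] => []
  | f, x :: t => if f then x :: pvPick false t else pvPick true t

theorem pvSegRest_foldl (c : Int → Bool) (xs : List Int) :
    ∀ (lis : List (List Int)) (temp : List Int),
    xs.foldl (fun (st : List (List Int) × List Int) i =>
        if c i then (st.1 ++ [st.2 ++ [i]], []) else (st.1, st.2 ++ [i])) (lis, temp)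
      = (lis ++ (pvSegRest c temp xs).1, (pvSegRest c temp xs).2) := by
  induction xs with
  | nil => intro lis temp; simp [pvSegRest]
  | cons i xs ih =>
      intro lis temp
      by_cases h : c i <;> simp [pvSegRest, h, ih]

theorem pvSegRest_range (c : Int → Bool) (k : Nat) :
    ∀ (a s : Int), a ≤ s →
    (pvSegRest c (PySem.List.pyRange a s 1) (PySem.List.pyRange s (s + k) 1)).1
      = pvSegB a ((PySem.List.pyRange s (s + k) 1).filter c) := by
  induction k with
  | zero =>
      intro a s _
      simp [PySem.List.pyRange_one_eq_nil (le_refl s), pvSegRest, pvSegB]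
  | succ k ih =>
      intro a s ha
      have hcons : PySem.List.pyRange s (s + (k + 1 : Nat)) 1
          = s :: PySem.List.pyRange (s + 1) (s + 1 + k) 1 := by
        rw [PySem.List.pyRange_one_cons (by push_cast; omega)]
        congr 1; push_cast; ring_nf
      rw [hcons]
      by_cases h : c s
      · have hsnoc : PySem.List.pyRange a s 1 ++ [s] = PySem.List.pyRange a (s + 1) 1 :=
          (PySem.List.pyRange_one_succ_right ha).symm
        have hnil : (PySem.List.pyRange (s + 1) (s + 1) 1 : List Int) = [] :=
          PySem.List.pyRange_one_eq_nil (le_refl _)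
        have := ih (s + 1) (s + 1) (le_refl _)
        rw [hnil] at this
        simp [pvSegRest, h, pvSegB, hsnoc, pvSegRest, this]
      · have hsnoc : PySem.List.pyRange a s 1 ++ [s] = PySem.List.pyRange a (s + 1) 1 :=
          (PySem.List.pyRange_one_succ_right ha).symm
        have := ih a (s + 1) (by omega)
        simp [pvSegRest, h, hsnoc, this]

theorem pvMod_two_succ (k : Int) :
    (PySem.Int.mod (k + 1) 2 == 1) = !(PySem.Int.mod k 2 == 1) := by
  rw [PySem.Int.mod_eq_emod_of_pos (by norm_num : (0:Int) < 2),
    PySem.Int.mod_eq_emod_of_pos (by norm_num : (0:Int) < 2)]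
  have h1 : (k + 1) % 2 = 0 ∨ (k + 1) % 2 = 1 := Int.emod_two_eq_zero_or_one _
  have h2 : k % 2 = 0 ∨ k % 2 = 1 := Int.emod_two_eq_zero_or_one _
  rcases h1 with h1 | h1 <;> rcases h2 with h2 | h2 <;> simp [h1, h2] <;> omega

theorem pvPick_foldl_enumerate (bs : List Int) :
    ∀ (k s : Int) (out : List (List Int)),
    ((PySem.List.enumerate bs k).foldl
      (fun (st : List (List Int) × Int) (kb : Int × Int) =>
        if PySem.Int.mod kb.1 2 == 1 then
          (st.1 ++ [PySem.List.pyRange st.2 (kb.2 + 1) 1], kb.2 + 1)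
        else
          (st.1, kb.2 + 1)) (out, s)).1
      = out ++ pvPick (PySem.Int.mod k 2 == 1) (pvSegB s bs) := by
  induction bs with
  | nil => intro k s out; simp [PySem.List.enumerate_nil, pvSegB, pvPick]
  | cons b bs ih =>
      intro k s out
      rw [PySem.List.enumerate_cons, List.foldl_cons]
      by_cases h : PySem.Int.mod k 2 = 1
      · have hke : k % 2 = 1 := by
          rwa [PySem.Int.mod_eq_emod_of_pos (by norm_num : (0:Int) < 2)] at h
        rw [if_pos (by simp [hke])]
        rw [ih (k + 1) (b + 1), pvMod_two_succ]
        simp [pvSegB, pvPick, hke]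
      · have hke : ¬ k % 2 = 1 := by
          rwa [PySem.Int.mod_eq_emod_of_pos (by norm_num : (0:Int) < 2)] at h
        have hke0 : k % 2 = 0 := by omega
        rw [if_neg (by simp; omega)]
        rw [ih (k + 1) (b + 1), pvMod_two_succ]
        simp [pvSegB, pvPick, hke0]

theorem pvPick_append_singleton {α : Type} (t : List α) :
    ∀ (f : Bool) (x : α),
    pvPick f (t ++ [x]) = pvPick f t ++ (if f = (t.length % 2 == 0) then [x] else []) := by
  induction t with
  | nil => intro f x; cases f <;> simp [pvPick]
  | cons y t ih =>
      intro f x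
      cases f
      · simp only [List.cons_append, pvPick, List.length_cons, if_neg (by simp : ¬ (false = true))]
        rw [ih true x]
        rcases Nat.mod_two_eq_zero_or_one t.length with h | h
        · have h1 : (t.length + 1) % 2 = 1 := by omega
          simp [h, h1]
        · have h1 : (t.length + 1) % 2 = 0 := by omega
          simp [h, h1]
      · simp only [List.cons_append, pvPick, List.length_cons]
        rw [ih false x]
        rcases Nat.mod_two_eq_zero_or_one t.length with h | h
        · have h1 : (t.length + 1) % 2 = 1 := by omega
          simp [h, h1]
        · have h1 : (t.length + 1) % 2 = 0 := by omega
          simp [h, h1]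

theorem pvPick_comprehension {α : Type} (d : α) (l : List α) :
    ((PySem.List.pyRange 0 (l.length : Int) 1).filter
        (fun i => PySem.Int.mod i 2 == 1)).map
      (fun i => PySem.List.pyGetD l i d) = pvPick false l := by
  induction l using List.reverseRecOn with
  | nil => simp [PySem.List.pyRange_one_eq_nil (le_refl (0 : Int)), pvPick]
  | append_singleton t x ih =>
      have hlen : ((t ++ [x]).length : Int) = (t.length : Int) + 1 := by simp
      rw [hlen, PySem.List.pyRange_one_succ_right (by positivity), List.filter_append,
        List.map_append]
      have hmain :
          ((PySem.List.pyRange 0 (t.length : Int) 1).filter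
              (fun i => PySem.Int.mod i 2 == 1)).map
            (fun i => PySem.List.pyGetD (t ++ [x]) i d)
          = ((PySem.List.pyRange 0 (t.length : Int) 1).filter
              (fun i => PySem.Int.mod i 2 == 1)).map
            (fun i => PySem.List.pyGetD t i d) := by
        apply List.map_congr_left
        intro i hi
        have hi' := List.mem_filter.mp hi
        have hmem := (PySem.List.mem_pyRange_one).mp hi'.1
        rw [PySem.List.pyGetD_eq_getElem (t ++ [x]) d hmem.1 (by simp; omega),
          PySem.List.pyGetD_eq_getElem t d hmem.1 (by omega)]
        rw [List.getElem_append_left (by omega)]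
      rw [hmain, ih, pvPick_append_singleton]
      rcases Nat.mod_two_eq_zero_or_one t.length with h | h
      · have hfilter : List.filter (fun i => PySem.Int.mod i 2 == 1) [(t.length : Int)] = [] := by
          simp
          omega
        rw [hfilter]
        simp [h]
      · have hfilter : List.filter (fun i => PySem.Int.mod i 2 == 1) [(t.length : Int)]
            = [(t.length : Int)] := by
          simp
          omega
        have hget : PySem.List.pyGetD (t ++ [x]) (t.length : Int) d = x := by
          rw [PySem.List.pyGetD_eq_getElem (t ++ [x]) d (by positivity) (by simp)]
          simp
        rw [hfilter]
        simp [h, hget]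

theorem pvRange_shift (n : Int) :
    PySem.List.pyRange 0 (n - 1) 1 = PySem.List.pyRange 0 (0 + ((n - 1).toNat : Int)) 1 := by
  by_cases h : 0 ≤ n - 1
  · congr 1; omega
  · rw [PySem.List.pyRange_one_eq_nil (by omega), PySem.List.pyRange_one_eq_nil (by omega)]

-- ===== VERDICT (by name: the statement is the Claim_ definition above) =====
theorem split_bool_arr_spec : Claim_equal_split_bool_arr := by
  intro bool_index _
  unfold Spec_split_bool_arr split_bool_arr split_bool_arr_alt
  simp only []
  set c : Int → Bool :=
    fun i => PySem.List.pyGet? bool_index i != PySem.List.pyGet? bool_index (i + 1) with hc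
  rw [pvRange_shift]
  have hnil : (PySem.List.pyRange 0 0 1 : List Int) = [] :=
    PySem.List.pyRange_one_eq_nil (le_refl _)
  have hA := pvSegRest_foldl c (PySem.List.pyRange 0 (0 + (((bool_index.length : Int) - 1).toNat : Int)) 1) [] []
  have hM := pvSegRest_range c ((bool_index.length : Int) - 1).toNat 0 0 (le_refl 0)
  rw [hnil] at hM
  have hB := pvPick_foldl_enumerate
    ((PySem.List.pyRange 0 (0 + (((bool_index.length : Int) - 1).toNat : Int)) 1).filter c) 0 0 []
  rw [hA]
  simp only [List.nil_append]
  rw [hM, pvPick_comprehension, hB]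
  simp
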